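-- pv_equiv track=rewrite | github.com/pjoscely/AP-Computer-Science-Principles | Word Search.py | searchESE
-- ===== SOURCE A (Python) =====
-- def isValid(puzzle, i, j):
--     return (0<=i and i <len(puzzle) and 0<=j and j <len(puzzle))
--
-- def searchESE(puzzle,i,j,word):
--     E = i+1
--     S = j+1
--     pos = 1
--     while pos < len(word):
--         if(not isValid(puzzle,E,S) or (puzzle[E][S] != word[pos])):
--             return False
--         S+=1
--         E+=1
--         pos+=1
--     return True
-- ===== SOURCE B (Python) =====
-- def isValid(puzzle, i, j):
--     return (0<=i and i <len(puzzle) and 0<=j and j <len(puzzle))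
--
-- def searchESE(puzzle, i, j, word):
--     # Phase 1: walk the diagonal collecting up to len(word)-1 cells.
--     collected = []
--     E, S = i + 1, j + 1
--     while len(collected) + 1 < len(word) and isValid(puzzle, E, S):
--         collected.append(puzzle[E][S])
--         E += 1
--         S += 1
--     # Phase 2: compare what was collected with the tail of the word.
--     return collected == list(word[1:])
-- ===== Notes on version B (the rewrite author's own statement) =====
-- stated objective: alternative
-- what changed: A's single interleaved walk that compares each diagonal cell against word[pos] and early-returns False is replaced by a two-phase build-then-compare: B first collects up to len(word)-1 diagonal cells into a list, then returns whether that list equals list(word[1:]).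
-- outside the precondition, e.g. on searchESE([['a', 'b'], ['c']], -1, -1, 'xyz'): A returns False, B raises IndexError
import Mathlib
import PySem

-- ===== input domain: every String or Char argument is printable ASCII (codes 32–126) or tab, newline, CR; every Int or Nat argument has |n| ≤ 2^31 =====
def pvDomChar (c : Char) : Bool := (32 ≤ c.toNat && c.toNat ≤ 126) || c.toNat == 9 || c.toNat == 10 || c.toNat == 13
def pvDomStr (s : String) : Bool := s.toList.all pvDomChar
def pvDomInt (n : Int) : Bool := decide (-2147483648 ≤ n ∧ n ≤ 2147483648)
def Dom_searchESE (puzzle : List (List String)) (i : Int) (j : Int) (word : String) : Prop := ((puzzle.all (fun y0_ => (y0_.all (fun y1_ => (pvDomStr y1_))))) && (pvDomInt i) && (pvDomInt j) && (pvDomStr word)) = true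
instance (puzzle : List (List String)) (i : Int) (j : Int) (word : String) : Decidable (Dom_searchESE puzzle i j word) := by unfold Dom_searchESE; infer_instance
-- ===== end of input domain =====

-- B re-implements A as a two-phase build-then-compare (collect the diagonal cells, then
-- compare the list with list(word[1:])) instead of A's interleaved compare-as-you-walk loop.

-- shared helper: the Python module's isValid (square-grid bound check)
def isValidESE (puzzle : List (List String)) (i : Int) (j : Int) : Bool :=
  decide (0 ≤ i) && decide (i < (puzzle.length : Int)) && decide (0 ≤ j) && decide (j < (puzzle.length : Int))

-- puzzle[E][S]; none = Python IndexError (a ragged row shorter than len(puzzle)), excluded by Pre_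
def cellESE? (puzzle : List (List String)) (E : Int) (S : Int) : Option String :=
  (PySem.List.pyGet? puzzle E).bind (fun row => PySem.List.pyGet? row S)

-- ===== PORT A =====
-- A's while loop: fuel = len(word) - pos; loop condition pos < len(word) becomes fuel > 0
def searchESE_go (puzzle : List (List String)) (word : String) : Nat → Int → Int → Nat → Bool
  | 0, _, _, _ => true
  | fuel+1, E, S, pos =>
    if ¬ (isValidESE puzzle E S) then false
    else
      match cellESE? puzzle E S, PySem.Str.pyGet? word (pos : Int) with
      | some cell, some c =>
        if cell ≠ String.ofList [c] then false
        else searchESE_go puzzle word fuel (E+1) (S+1) (pos+1)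
      | _, _ => false   -- cell lookup none = Python raises IndexError there; outside Pre_

def searchESE (puzzle : List (List String)) (i : Int) (j : Int) (word : String) : Bool :=
  searchESE_go puzzle word (word.toList.length - 1) (i+1) (j+1) 1

-- ===== PORT B =====
-- phase 1: collect up to fuel = len(word)-1 diagonal cells while in the grid
def collectESE (puzzle : List (List String)) : Nat → Int → Int → List String
  | 0, _, _ => []
  | fuel+1, E, S =>
    if isValidESE puzzle E S then
      (cellESE? puzzle E S).getD "" :: collectESE puzzle fuel (E+1) (S+1)
      -- getD: none = Python IndexError there; outside Pre_
    else []

-- phase 2: collected == list(word[1:])  (word[1:] = drop 1, each char as a 1-char string)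
def searchESE_alt (puzzle : List (List String)) (i : Int) (j : Int) (word : String) : Bool :=
  decide (collectESE puzzle (word.toList.length - 1) (i+1) (j+1)
            = (word.toList.drop 1).map (fun c => String.ofList [c]))

-- ===== PRECONDITION & SPEC =====
-- Pre_ excludes ragged grids on which some visited in-square diagonal position lies past the
-- end of its (shorter-than-len(puzzle)) row: Python A raises IndexError there unless an earlier
-- cell already mismatched, and B's collect phase raises there.
def Pre_searchESE (puzzle : List (List String)) (i : Int) (j : Int) (word : String) : Prop :=
  ∀ t : Nat, t < word.toList.length - 1 →
    isValidESE puzzle (i+1+(t:Int)) (j+1+(t:Int)) = true →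
    (cellESE? puzzle (i+1+(t:Int)) (j+1+(t:Int))).isSome = true
instance (puzzle : List (List String)) (i : Int) (j : Int) (word : String) : Decidable (Pre_searchESE puzzle i j word) := by unfold Pre_searchESE; infer_instance

def pvWitness_searchESE : List (List String) × Int × Int × String :=
  ([["a","b"],["c","d"]], 0, 0, "ad")

def Spec_searchESE (puzzle : List (List String)) (i : Int) (j : Int) (word : String) (out : Bool) : Prop := out = searchESE_alt puzzle i j word
instance (puzzle : List (List String)) (i : Int) (j : Int) (word : String) (out : Bool) : Decidable (Spec_searchESE puzzle i j word out) := by unfold Spec_searchESE; infer_instance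

-- ===== CLAIM (what is proved, stated in full; the proofs are below) =====
def Claim_equal_searchESE : Prop := ∀ (puzzle : List (List String)) (i : Int) (j : Int) (word : String), Dom_searchESE puzzle i j word → Pre_searchESE puzzle i j word → Spec_searchESE puzzle i j word (searchESE puzzle i j word)

-- ===== LEMMAS AND PROOFS =====

lemma go_eq_collect (puzzle : List (List String)) (word : String) :
    ∀ (fuel : Nat) (E S : Int) (pos : Nat),
    fuel = word.toList.length - pos →
    (∀ t : Nat, t < fuel → isValidESE puzzle (E+(t:Int)) (S+(t:Int)) = true →
        (cellESE? puzzle (E+(t:Int)) (S+(t:Int))).isSome = true) →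
    searchESE_go puzzle word fuel E S pos
      = decide (collectESE puzzle fuel E S
                  = (word.toList.drop pos).map (fun c => String.ofList [c])) := by
  intro fuel
  induction fuel with
  | zero =>
    intro E S pos hf _
    have hlen : word.toList.length ≤ pos := by omega
    simp [searchESE_go, collectESE, List.drop_eq_nil_of_le hlen]
  | succ n ih =>
    intro E S pos hf hpre
    have hpos : pos < word.toList.length := by omega
    obtain ⟨c, hc⟩ : ∃ c, word.toList[pos]? = some c := by
      exact ⟨word.toList[pos], List.getElem?_eq_getElem hpos⟩
    have hdrop : word.toList.drop pos = c :: word.toList.drop (pos+1) := by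
      rw [List.drop_eq_getElem_cons hpos]
      simp [List.getElem?_eq_getElem hpos] at hc
      simp [hc]
    by_cases hv : isValidESE puzzle E S = true
    · have h0 := hpre 0 (by omega)
      simp only [Nat.cast_zero, add_zero] at h0
      obtain ⟨v, hvcell⟩ := Option.isSome_iff_exists.mp (h0 hv)
      have hwc : PySem.Str.pyGet? word (pos : Int) = some c := by simp [hc]
      have hpre' : ∀ t : Nat, t < n → isValidESE puzzle (E+1+(t:Int)) (S+1+(t:Int)) = true →
          (cellESE? puzzle (E+1+(t:Int)) (S+1+(t:Int))).isSome = true := by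
        intro t ht h
        have h1 := hpre (t+1) (by omega)
        rw [show ((t+1 : Nat) : Int) = (t : Int) + 1 by push_cast; ring] at h1
        rw [show E + ((t:Int)+1) = E + 1 + (t:Int) by ring,
            show S + ((t:Int)+1) = S + 1 + (t:Int) by ring] at h1
        exact h1 h
      have hrec := ih (E+1) (S+1) (pos+1) (by omega) hpre'
      simp only [searchESE_go, collectESE, hv, not_true, ite_false, hvcell, hwc, if_true, hdrop, List.map_cons]
      by_cases hve : v = String.ofList [c]
      · subst hve
        simp [hrec]
      · simp [hve]
    · have hvf : isValidESE puzzle E S = false := by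
        cases h : isValidESE puzzle E S with
        | false => rfl
        | true => exact absurd h hv
      have hne : (word.toList.drop pos).map (fun c => String.ofList [c]) ≠ [] := by
        simp [hdrop]
      simp only [searchESE_go, collectESE, hvf]
      rw [hdrop]
      simp

-- ===== VERDICT (by name: the statement is the Claim_ definition above) =====
theorem searchESE_spec : Claim_equal_searchESE := by
  intro puzzle i j word _ hpre
  unfold Spec_searchESE searchESE searchESE_alt
  exact go_eq_collect puzzle word (word.toList.length - 1) (i+1) (j+1) 1 rfl hpre
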